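-- pv_equiv track=rewrite | github.com/cheerstopaula/Allocation | undergrad_code/metrics.py | getNash
-- ===== SOURCE A (Python) =====
-- def getNash(X):
--   util = 1
--   numZeroes = 0
--   for i in X:
--     c = sum(i)
--     if (c == 0):
--       numZeroes += 1
--     else:
--       util *= c
--   return numZeroes, util #take the log to view in a nicer format
-- ===== SOURCE B (Python) =====
-- def getNash(X):
--   # divide and conquer: (zero-count, nonzero-product) is a monoid homomorphism over rows
--   def go(lo, hi):
--     if hi - lo == 0:
--       return (0, 1)
--     if hi - lo == 1:
--       c = sum(X[lo])
--       return (1, 1) if c == 0 else (0, c)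
--     mid = (lo + hi) // 2
--     z1, u1 = go(lo, mid)
--     z2, u2 = go(mid, hi)
--     return (z1 + z2, u1 * u2)
--   return go(0, len(X))
-- ===== Notes on version B (the rewrite author's own statement) =====
-- stated objective: alternative
-- what changed: Replaces A's single fused accumulator loop by a divide-and-conquer recursion that splits the row-index range in half and combines (zero-count, nonzero-product) pairs, exploiting that this pair is a monoid homomorphism over rows.
import Mathlib
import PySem

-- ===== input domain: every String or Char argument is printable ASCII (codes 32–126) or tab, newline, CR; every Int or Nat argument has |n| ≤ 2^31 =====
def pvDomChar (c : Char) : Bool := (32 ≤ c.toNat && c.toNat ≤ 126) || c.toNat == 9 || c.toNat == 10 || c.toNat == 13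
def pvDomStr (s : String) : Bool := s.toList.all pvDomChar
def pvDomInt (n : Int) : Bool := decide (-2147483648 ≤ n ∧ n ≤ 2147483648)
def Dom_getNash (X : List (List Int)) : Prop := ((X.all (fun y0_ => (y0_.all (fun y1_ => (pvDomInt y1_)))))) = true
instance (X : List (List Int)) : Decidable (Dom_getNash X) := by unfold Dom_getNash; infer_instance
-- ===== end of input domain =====

-- ===== PORT A =====
-- B replaces A's fused accumulator loop by a divide-and-conquer over the index range; alternative decomposition, same asymptotics.
def getNash (X : List (List Int)) : Int × Int :=
  let p := X.foldl (fun (s : Int × Int) i =>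
    let c := i.sum
    if c = 0 then (s.1, s.2 + 1) else (s.1 * c, s.2)) (1, 0)
  (p.2, p.1)

-- ===== PORT B =====
-- go(lo, hi): every X[lo] access has lo < X.length, so pyGet? returns some; .getD [] is never the default.
def goNash (X : List (List Int)) (lo hi : Nat) : Int × Int :=
  if hi - lo = 0 then (0, 1)
  else if hi - lo = 1 then
    let c := ((PySem.List.pyGet? X (lo : Int)).getD []).sum
    if c = 0 then (1, 1) else (0, c)
  else
    let mid := (lo + hi) / 2
    let p1 := goNash X lo mid
    let p2 := goNash X mid hi
    (p1.1 + p2.1, p1.2 * p2.2)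
termination_by hi - lo
decreasing_by all_goals omega

def getNash_alt (X : List (List Int)) : Int × Int := goNash X 0 X.length

-- ===== PRECONDITION & SPEC =====
def Spec_getNash (X : List (List Int)) (out : Int × Int) : Prop := out = getNash_alt X
instance (X : List (List Int)) (out : Int × Int) : Decidable (Spec_getNash X out) := by unfold Spec_getNash; infer_instance

-- ===== CLAIM (what is proved, stated in full; the proofs are below) =====
def Claim_equal_getNash : Prop := ∀ (X : List (List Int)), Dom_getNash X → Spec_getNash X (getNash X)

-- ===== LEMMAS AND PROOFS =====

-- ===== VERDICT (by name: the statement is the Claim_ definition above) =====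
-- spec function: (zero-count, nonzero-product) of the row sums of a row list
def nashF (L : List (List Int)) : Int × Int :=
  (((L.map List.sum).count 0 : Int), ((L.map List.sum).filter (fun s => s ≠ 0)).prod)

theorem nashF_append (L1 L2 : List (List Int)) :
    nashF (L1 ++ L2) = ((nashF L1).1 + (nashF L2).1, (nashF L1).2 * (nashF L2).2) := by
  simp [nashF, List.count_append, List.filter_append]

theorem getNash_fold (L : List Int) (u z : Int) :
    L.foldl (fun (s : Int × Int) c =>
      if c = 0 then (s.1, s.2 + 1) else (s.1 * c, s.2)) (u, z)
      = (u * (L.filter (fun s => s ≠ 0)).prod, z + (L.count 0 : Int)) := by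
  induction L generalizing u z with
  | nil => simp
  | cons a t ih =>
    simp only [List.foldl_cons]
    by_cases h : a = 0
    · simp only [h, ih, List.filter_cons, List.count_cons]
      simp
      omega
    · rw [if_neg h, ih]
      simp [h, mul_assoc]

theorem goNash_eq (X : List (List Int)) : ∀ (lo hi : Nat), lo ≤ hi → hi ≤ X.length →
    goNash X lo hi = nashF ((X.drop lo).take (hi - lo)) := by
  intro lo hi
  induction lo, hi using goNash.induct (X := X) with
  | case1 lo hi h =>
    intro _ _
    rw [goNash]
    simp [h, nashF]
  | case2 lo hi h0 h1 c hc =>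
    intro hlo hhi
    rw [goNash]
    simp only [if_neg h0, if_pos h1]
    have hlt : lo < X.length := by omega
    rw [h1, List.drop_eq_getElem_cons hlt]
    simp only [List.take_succ_cons, List.take_zero]
    have hc' : X[lo].sum = 0 := by
      have h := hc
      simp only [c, PySem.List.pyGet?_natCast, List.getElem?_eq_getElem hlt, Option.getD_some] at h
      exact h
    simp [hc', nashF, List.getElem?_eq_getElem hlt]
  | case3 lo hi h0 h1 c hc =>
    intro hlo hhi
    rw [goNash]
    simp only [if_neg h0, if_pos h1]
    have hlt : lo < X.length := by omega
    rw [h1, List.drop_eq_getElem_cons hlt]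
    simp only [List.take_succ_cons, List.take_zero]
    have hc' : ¬ X[lo].sum = 0 := by
      have h := hc
      simp only [c, PySem.List.pyGet?_natCast, List.getElem?_eq_getElem hlt, Option.getD_some] at h
      exact h
    simp [hc', nashF, List.getElem?_eq_getElem hlt]
  | case4 lo hi h0 h1 mid ih1 ih2 =>
    have hm : mid = (lo + hi) / 2 := rfl
    intro hlo hhi
    rw [goNash]
    simp only [if_neg h0, if_neg h1]
    rw [ih1 (by omega) (by omega), ih2 (by omega) (by omega)]
    have hsplit : (X.drop lo).take (hi - lo)
        = (X.drop lo).take ((lo + hi) / 2 - lo) ++ (X.drop ((lo + hi) / 2)).take (hi - (lo + hi) / 2) := by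
      have h2 : X.drop ((lo + hi) / 2) = (X.drop lo).drop ((lo + hi) / 2 - lo) := by
        rw [List.drop_drop]
        congr 1
        omega
      rw [h2, ← List.take_add]
      congr 1
      omega
    rw [hsplit, nashF_append]

theorem getNash_spec : Claim_equal_getNash := by
  intro X _
  unfold Spec_getNash getNash getNash_alt
  have h := getNash_fold (X.map List.sum) 1 0
  rw [List.foldl_map] at h
  simp only []
  rw [h, goNash_eq X 0 X.length (by omega) (by omega)]
  simp [nashF]
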